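-- pv_equiv track=rewrite | github.com/Compass-Brand/compass-engine | reference/automation-spec-archive/bmad_automation/menu_participation_engine.py | score_position_validation
-- ===== SOURCE A (Python) =====
-- def score_position_validation(text: str, menu_line: str) -> int:
--     """Score based on menu position in output.
--
--     Full points (20) for menu at end of output.
--     Reduced points for embedded menus.
--
--     Args:
--         text: Full text containing the menu.
--         menu_line: The menu line to validate.
--
--     Returns:
--         Score from 0-20.
--     """
--     max_score = 20
--
--     # Check if menu is at end of text
--     text_stripped = text.strip()
--     menu_stripped = menu_line.strip()
--
--     if text_stripped.endswith(menu_stripped):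
--         return max_score
--
--     # Check if menu is on its own line
--     lines = text.split("\n")
--     for i, line in enumerate(lines):
--         if menu_stripped in line:
--             # Is this the last non-empty line?
--             remaining_lines = [l.strip() for l in lines[i + 1 :] if l.strip()]
--             if not remaining_lines:
--                 return max_score
--             # Otherwise, give partial credit for being on own line
--             return 10
--
--     # Menu embedded in text
--     return 5
-- ===== SOURCE B (Python) =====
-- def score_position_validation(text: str, menu_line: str) -> int:
--     """Score menu position within text (0-20); alternative decomposition:
--     last-non-blank index computed by a backward scan, compared with the
--     first-match index, replacing A's per-hit slice-and-filter."""
--     menu_stripped = menu_line.strip()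
--     if text.strip().endswith(menu_stripped):
--         return 20
--
--     lines = text.split("\n")
--
--     # index of the last non-blank line, -1 if all blank
--     last = len(lines) - 1
--     while last >= 0 and not lines[last].strip():
--         last -= 1
--
--     # index of the first line containing the menu
--     first = None
--     for i, line in enumerate(lines):
--         if menu_stripped in line:
--             first = i
--             break
--
--     if first is None:
--         return 5
--     return 20 if first >= last else 10
-- ===== Notes on version B (the rewrite author's own statement) =====
-- stated objective: alternative
-- what changed: Replaces A's per-hit slice-and-filter of the remaining lines with two index scans: a backward scan for the last non-blank line index and a forward scan for the first line containing the menu, deciding by comparing the two indices.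
import Mathlib
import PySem

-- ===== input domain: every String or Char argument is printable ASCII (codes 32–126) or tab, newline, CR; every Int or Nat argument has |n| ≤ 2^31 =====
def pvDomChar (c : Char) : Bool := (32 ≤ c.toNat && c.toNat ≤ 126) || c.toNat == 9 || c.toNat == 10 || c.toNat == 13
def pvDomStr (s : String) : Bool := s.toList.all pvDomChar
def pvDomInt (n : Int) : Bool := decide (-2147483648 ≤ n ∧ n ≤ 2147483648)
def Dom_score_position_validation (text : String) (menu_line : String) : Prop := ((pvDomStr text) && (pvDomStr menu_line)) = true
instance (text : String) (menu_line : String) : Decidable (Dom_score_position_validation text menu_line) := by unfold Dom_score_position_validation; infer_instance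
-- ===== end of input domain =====

-- B replaces A's per-hit slice-and-filter with a backward scan for the last
-- non-blank line index compared against the first-match index (objective: alternative).

-- ===== PORT A =====
-- A's for-loop over enumerate(lines): at the first line containing the menu,
-- build [l.strip() for l in lines[i+1:] if l.strip()] (lines[i+1:] is `rest` here).
def pvLoopA (menu : List Char) : List (List Char) → Int
  | [] => 5
  | l :: rest =>
    if PySem.Chars.isIn menu l then
      if ((rest.map (fun x => PySem.Chars.strip x)).filter (fun s => s ≠ [])) = [] then 20 else 10
    else pvLoopA menu rest

def score_position_validation (text : String) (menu_line : String) : Int :=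
  let text_stripped := PySem.Chars.strip text.toList
  let menu_stripped := PySem.Chars.strip menu_line.toList
  if PySem.Chars.endswith text_stripped menu_stripped then 20
  else pvLoopA menu_stripped (PySem.Chars.splitOn text.toList ['\n'])

-- ===== PORT B =====
-- B's `while last >= 0 and not lines[last].strip(): last -= 1`, started at
-- len(lines)-1; argument k = last+1, the index is always in range so getD is lines[last].
def pvLastIdx (lines : List (List Char)) : Nat → Int
  | 0 => -1
  | k+1 => if PySem.Chars.strip (lines.getD k []) ≠ [] then ((k : Nat) : Int) else pvLastIdx lines k

-- B's first-match loop with break.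
def pvFirstMatch (menu : List Char) : List (List Char) → Option Nat
  | [] => none
  | l :: rest => if PySem.Chars.isIn menu l then some 0 else (pvFirstMatch menu rest).map (· + 1)

def score_position_validation_alt (text : String) (menu_line : String) : Int :=
  let menu_stripped := PySem.Chars.strip menu_line.toList
  if PySem.Chars.endswith (PySem.Chars.strip text.toList) menu_stripped then 20
  else
    let lines := PySem.Chars.splitOn text.toList ['\n']
    let last := pvLastIdx lines lines.length
    match pvFirstMatch menu_stripped lines with
    | none => 5
    | some j => if (j : Int) ≥ last then 20 else 10

-- ===== PRECONDITION & SPEC =====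
def Spec_score_position_validation (text : String) (menu_line : String) (out : Int) : Prop := out = score_position_validation_alt text menu_line
instance (text : String) (menu_line : String) (out : Int) : Decidable (Spec_score_position_validation text menu_line out) := by unfold Spec_score_position_validation; infer_instance

-- ===== CLAIM (what is proved, stated in full; the proofs are below) =====
def Claim_equal_score_position_validation : Prop := ∀ (text : String) (menu_line : String), Dom_score_position_validation text menu_line → Spec_score_position_validation text menu_line (score_position_validation text menu_line)

-- ===== LEMMAS AND PROOFS =====

-- pvLastIdx characterisation: the last non-blank index below k is ≤ j iff every
-- index in (j, k) strips to empty.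
theorem pvLastIdx_le_iff (lines : List (List Char)) (j : Nat) :
    ∀ k, (pvLastIdx lines k ≤ (j : Int) ↔ ∀ i, j < i → i < k → PySem.Chars.strip (lines.getD i []) = []) := by
  intro k
  induction k with
  | zero =>
    constructor
    · intro _ i _ h; omega
    · intro _; simp [pvLastIdx]
  | succ k ih =>
    simp only [pvLastIdx]
    split
    · rename_i hne
      constructor
      · intro hle i h1 h2
        have hkj : k ≤ j := by exact_mod_cast hle
        exact absurd h1 (by omega)
      · intro h
        have : ¬ j < k := fun hjk => hne (h k hjk (Nat.lt_succ_self k))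
        exact_mod_cast Nat.le_of_not_lt this
    · rename_i hne
      rw [not_not] at hne
      rw [ih]
      constructor
      · intro h i h1 h2
        rcases Nat.lt_succ_iff_lt_or_eq.mp h2 with h' | h'
        · exact h i h1 h'
        · subst h'; exact hne
      · intro h i h1 h2
        exact h i h1 (Nat.lt_succ_of_lt h2)

-- blankness of the suffix after index j, stated on members vs on indices.
theorem blank_drop_iff (lines : List (List Char)) (j : Nat) :
    (∀ l ∈ lines.drop (j+1), PySem.Chars.strip l = []) ↔
      ∀ i, j < i → i < lines.length → PySem.Chars.strip (lines.getD i []) = [] := by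
  constructor
  · intro h i h1 h2
    rw [List.getD_eq_getElem lines [] h2]
    apply h
    have hi : i - (j+1) < (lines.drop (j+1)).length := by
      simp only [List.length_drop]; omega
    have heq : (lines.drop (j+1))[i - (j+1)] = lines[i] := by
      rw [List.getElem_drop]
      congr 1; omega
    rw [← heq]
    exact List.getElem_mem hi
  · intro h l hl
    obtain ⟨i, hi, hEq⟩ := List.mem_iff_getElem.mp hl
    have hlen : j + 1 + i < lines.length := by
      simp only [List.length_drop] at hi; omega
    rw [← hEq, List.getElem_drop]
    rw [← List.getD_eq_getElem lines [] hlen]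
    exact h (j+1+i) (by omega) hlen

-- A's loop computed via the first-match index and blank-suffix test.
theorem pvLoopA_eq (menu : List Char) (lines : List (List Char)) :
    pvLoopA menu lines =
      match pvFirstMatch menu lines with
      | none => 5
      | some j => if (lines.drop (j+1)).all (fun l => PySem.Chars.strip l == []) then 20 else 10 := by
  induction lines with
  | nil => rfl
  | cons l rest ih =>
    simp only [pvLoopA, pvFirstMatch]
    split
    · have hiff : ((rest.map (fun x => PySem.Chars.strip x)).filter (fun s => s ≠ [])) = [] ↔
          ((l :: rest).drop (0+1)).all (fun x => PySem.Chars.strip x == []) = true := by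
        simp [List.filter_eq_nil_iff, List.all_eq_true]
      simp only []
      rw [if_congr hiff rfl rfl]
    · rw [ih]
      cases hfm : pvFirstMatch menu rest with
      | none => rfl
      | some j =>
        simp only [Option.map_some]
        have : (l :: rest).drop (j + 1 + 1) = rest.drop (j + 1) := rfl
        rw [this]

-- ===== VERDICT (by name: the statement is the Claim_ definition above) =====
theorem score_position_validation_spec : Claim_equal_score_position_validation := by
  unfold Claim_equal_score_position_validation
  intro text menu_line _
  unfold Spec_score_position_validation
  unfold score_position_validation score_position_validation_alt
  simp only []
  split
  · rfl
  · rw [pvLoopA_eq]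
    cases pvFirstMatch (PySem.Chars.strip menu_line.toList) (PySem.Chars.splitOn text.toList ['\n']) with
    | none => rfl
    | some j =>
      simp only []
      have hiff : (((PySem.Chars.splitOn text.toList ['\n']).drop (j+1)).all
            (fun l => PySem.Chars.strip l == []) = true) ↔
          ((j : Int) ≥ pvLastIdx (PySem.Chars.splitOn text.toList ['\n']) (PySem.Chars.splitOn text.toList ['\n']).length) := by
        rw [ge_iff_le, pvLastIdx_le_iff, ← blank_drop_iff]
        simp [List.all_eq_true]
      rw [if_congr hiff rfl rfl]
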